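-- pv_equiv track=rewrite | github.com/dqstartupbuild/Skills | library/og-studio/scripts/detect_og_targets.py | dedupe_routes
-- ===== SOURCE A (Python) =====
-- def dedupe_routes(routes: list[dict]) -> list[dict]:
--     deduped: dict[str, dict] = {}
--     for route in routes:
--         key = route["route"]
--         existing = deduped.get(key)
--         if existing is None or route["source_file"] < existing["source_file"]:
--             deduped[key] = route
--     return [deduped[key] for key in sorted(deduped.keys())]
-- ===== SOURCE B (Python) =====
-- def dedupe_routes(routes: list[dict]) -> list[dict]:
--     keys = sorted({route["route"] for route in routes})
--     return [min((r for r in routes if r["route"] == key),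
--                 key=lambda r: r["source_file"])
--             for key in keys]
-- ===== Notes on version B (the rewrite author's own statement) =====
-- stated objective: simpler
-- what changed: Replaces the running-minimum dict accumulator with a two-line comprehension: collect the distinct route keys as a sorted set, then pick each group's representative with min(..., key=source_file), whose first-minimal tie-break matches A's strict '<' update.
-- outside the precondition, e.g. on dedupe_routes([{'route': '/a'}]): A returns [{'route': '/a'}], B raises KeyError
import Mathlib
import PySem

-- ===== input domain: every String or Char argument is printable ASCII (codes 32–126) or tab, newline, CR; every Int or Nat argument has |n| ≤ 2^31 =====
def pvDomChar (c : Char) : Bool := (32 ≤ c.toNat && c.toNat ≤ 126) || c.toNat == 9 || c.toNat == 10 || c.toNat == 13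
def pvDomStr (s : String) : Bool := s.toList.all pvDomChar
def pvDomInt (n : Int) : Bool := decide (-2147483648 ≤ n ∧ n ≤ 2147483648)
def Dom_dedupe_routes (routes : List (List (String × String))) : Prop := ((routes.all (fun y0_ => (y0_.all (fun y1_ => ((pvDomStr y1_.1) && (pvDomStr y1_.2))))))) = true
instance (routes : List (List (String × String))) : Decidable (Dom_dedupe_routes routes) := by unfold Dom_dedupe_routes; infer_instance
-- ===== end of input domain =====

-- B replaces A's running-minimum dict with sorted-distinct-keys + per-key min (same values; objective: simpler Python).


-- shared helper: route[k] (Python dict subscript; exact wherever the key is present, which Pre_ guarantees)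
def pyItem (r : List (String × String)) (k : String) : String :=
  ((PySem.Dict.mk r).get? k).getD ""

-- ===== PORT A =====
def dedupe_routes (routes : List (List (String × String))) : List (List (String × String)) :=
  let deduped : PySem.Dict String (List (String × String)) :=
    routes.foldl (fun d route =>
      let key := pyItem route "route"
      match d.get? key with
      | none => d.insert key route
      | some existing =>
          if pyItem route "source_file" < pyItem existing "source_file" then d.insert key route else d)
      PySem.Dict.empty
  (PySem.List.sorted deduped.keys (fun k => k) false).map (fun k => deduped.getD k [])

-- ===== PORT B =====
def dedupe_routes_alt (routes : List (List (String × String))) : List (List (String × String)) :=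
  let keys := PySem.List.sorted (PySem.Set.ofList (routes.map (fun r => pyItem r "route"))) (fun k => k) false
  keys.map (fun key =>
    (PySem.List.min? (routes.filter (fun r => pyItem r "route" == key))
        (fun r => pyItem r "source_file")).getD [])

-- ===== PRECONDITION & SPEC =====
-- Pre_ excludes route dicts missing "route" or "source_file": A raises KeyError on a missing "route" and on a
-- missing "source_file" of a repeated route key, but returns on a dict whose "source_file" is missing and whose
-- route key is unique — there B (which always reads "source_file" via min's key) raises KeyError instead.
def Pre_dedupe_routes (routes : List (List (String × String))) : Prop :=
  (routes.all (fun r => (PySem.Dict.mk r).contains "route" && (PySem.Dict.mk r).contains "source_file")) = true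
instance (routes : List (List (String × String))) : Decidable (Pre_dedupe_routes routes) := by unfold Pre_dedupe_routes; infer_instance
def pvWitness_dedupe_routes : (List (List (String × String))) :=
  [[("route", "/a"), ("source_file", "x.py")], [("route", "/a"), ("source_file", "b.py")]]
def Spec_dedupe_routes (routes : List (List (String × String))) (out : List (List (String × String))) : Prop := out = dedupe_routes_alt routes
instance (routes : List (List (String × String))) (out : List (List (String × String))) : Decidable (Spec_dedupe_routes routes out) := by unfold Spec_dedupe_routes; infer_instance

-- ===== CLAIM (what is proved, stated in full; the proofs are below) =====
def Claim_equal_dedupe_routes : Prop := ∀ (routes : List (List (String × String))), Dom_dedupe_routes routes → Pre_dedupe_routes routes → Spec_dedupe_routes routes (dedupe_routes routes)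

-- ===== LEMMAS AND PROOFS =====

-- A's dict fold, named for the lemmas below
def aStep (d : PySem.Dict String (List (String × String))) (route : List (String × String)) :
    PySem.Dict String (List (String × String)) :=
  let key := pyItem route "route"
  match d.get? key with
  | none => d.insert key route
  | some existing =>
      if pyItem route "source_file" < pyItem existing "source_file" then d.insert key route else d

-- value invariant: the dict's entry at k is the min?-fold over the routes whose "route" equals k
theorem aFold_get? (xs : List (List (String × String))) (d : PySem.Dict String (List (String × String))) (k : String) :
    (xs.foldl aStep d).get? k =
      (xs.filter (fun r => pyItem r "route" == k)).foldl
        (fun o r => match o with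
          | none => some r
          | some m => if pyItem r "source_file" < pyItem m "source_file" then some r else some m)
        (d.get? k) := by
  induction xs generalizing d with
  | nil => rfl
  | cons r xs ih =>
    simp only [List.foldl_cons, List.filter_cons]
    rw [ih]
    by_cases hk : pyItem r "route" = k
    · have hbeq : (pyItem r "route" == k) = true := beq_iff_eq.mpr hk
      simp only [hbeq]
      simp only [if_true, List.foldl_cons]
      congr 1
      show (aStep d r).get? k = _
      unfold aStep
      simp only [hk]
      cases h : d.get? k with
      | none => simp [PySem.Dict.get?_insert_self]
      | some e =>
        by_cases hlt : pyItem r "source_file" < pyItem e "source_file"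
        · simp [hlt, PySem.Dict.get?_insert_self]
        · simp [hlt, h]
    · have hbeq : (pyItem r "route" == k) = false := beq_eq_false_iff_ne.mpr hk
      simp only [hbeq]
      rw [if_neg (by simp)]
      congr 1
      show (aStep d r).get? k = d.get? k
      have hne : k ≠ pyItem r "route" := fun h => hk h.symm
      unfold aStep
      cases h : d.get? (pyItem r "route") with
      | none => simp only [h, PySem.Dict.get?_insert_of_ne _ _ hne]
      | some e =>
        simp only [h]
        by_cases hlt : pyItem r "source_file" < pyItem e "source_file"
        · simp [hlt, PySem.Dict.get?_insert_of_ne _ _ hne]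
        · simp [hlt]

-- keys invariant: one A-step changes the key list exactly like Python set.add on the "route" value
theorem aStep_keys (d : PySem.Dict String (List (String × String))) (r : List (String × String)) :
    (aStep d r).keys = PySem.Set.add d.keys (pyItem r "route") := by
  unfold aStep
  cases h : d.get? (pyItem r "route") with
  | none =>
    have hc : d.contains (pyItem r "route") = false := by
      rw [PySem.Dict.contains_eq_isSome_get?, h]; rfl
    have hm : PySem.Set.contains d.keys (pyItem r "route") = false := by
      rw [PySem.Dict.contains_eq_decide_mem_keys] at hc
      simp only [PySem.Set.contains, List.contains_eq_mem]
      simpa using hc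
    simp only [h]
    rw [PySem.Dict.keys_insert_of_not_contains d r hc]
    unfold PySem.Set.add
    rw [hm]
    simp
  | some e =>
    have hc : d.contains (pyItem r "route") = true := by
      rw [PySem.Dict.contains_eq_isSome_get?, h]; rfl
    have hm : PySem.Set.contains d.keys (pyItem r "route") = true := by
      rw [PySem.Dict.contains_eq_decide_mem_keys] at hc
      simp only [PySem.Set.contains, List.contains_eq_mem]
      simpa using hc
    simp only [h]
    by_cases hlt : pyItem r "source_file" < pyItem e "source_file"
    · rw [if_pos hlt, PySem.Dict.keys_insert_of_contains d r hc]
      unfold PySem.Set.add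
      rw [hm, if_pos rfl]
    · rw [if_neg hlt]
      unfold PySem.Set.add
      rw [hm, if_pos rfl]

-- keys invariant for the whole fold
theorem aFold_keys (xs : List (List (String × String))) (d : PySem.Dict String (List (String × String))) :
    (xs.foldl aStep d).keys = (xs.map (fun r => pyItem r "route")).foldl PySem.Set.add d.keys := by
  induction xs generalizing d with
  | nil => rfl
  | cons r xs ih => simp only [List.foldl_cons, List.map_cons, ih, aStep_keys]

-- ===== VERDICT (by name: the statement is the Claim_ definition above) =====
theorem dedupe_routes_spec : Claim_equal_dedupe_routes := by
  intro routes _ _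
  show dedupe_routes routes = dedupe_routes_alt routes
  show (PySem.List.sorted (routes.foldl aStep PySem.Dict.empty).keys (fun k => k) false).map
        (fun k => (routes.foldl aStep PySem.Dict.empty).getD k []) = _
  have hkeys : (routes.foldl aStep PySem.Dict.empty).keys
      = PySem.Set.ofList (routes.map (fun r => pyItem r "route")) := by
    rw [aFold_keys]; rfl
  have hval : ∀ k, (routes.foldl aStep PySem.Dict.empty).getD k []
      = (PySem.List.min? (routes.filter (fun r => pyItem r "route" == k))
          (fun r => pyItem r "source_file")).getD [] := by
    intro k
    rw [PySem.Dict.getD_eq_get?_getD, aFold_get?]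
    simp only [PySem.List.min?, PySem.Dict.get?_empty]
    congr 2
    funext o r
    cases o <;> rfl
  rw [hkeys, funext hval]
  rfl
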